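-- pv_equiv track=rewrite | github.com/beatrizmontenegro07/projeto-linguagens-formais | minimizador.py | segundoPasso
-- ===== SOURCE A (Python) =====
-- def segundoPasso(estados, dic_indices, table, finais):
--     #lista de nao finais
--     nao_finais = []
--
--     for e in estados:
--         isFinal = False
--         for f in finais:
--             if f == e:
--                 isFinal = True
--                 break
--         if isFinal == False:
--             nao_finais.append(e)
--
--
--     for f in finais:
--         for nf in nao_finais:
--             #como verificar se f e nf está na ordem da table, como garantir que stá fazendo na matriz triangular de baixo?
--             #podemos usar um map que relaciona um estado a uma ordem
--             if dic_indices[f] > dic_indices[nf]: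
--                 table[f][dic_indices[nf]] = 1
--             else:
--                 table[nf][dic_indices[f]] = 1
--
--     return table
-- ===== SOURCE B (Python) =====
-- def segundoPasso(estados, dic_indices, table, finais):
--     # Single pass over unordered pairs of estados: mark a pair exactly when
--     # one member is final and the other is not (set lookup instead of the
--     # finais x nao_finais cross product). Mutates table like the original.
--     F = set(finais)
--     rest = estados
--     while rest:
--         p, rest = rest[0], rest[1:]
--         for q in rest:
--             if (p in F) != (q in F):
--                 f, nf = (p, q) if p in F else (q, p)
--                 if dic_indices[f] > dic_indices[nf]:
--                     table[f][dic_indices[nf]] = 1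
--                 else:
--                     table[nf][dic_indices[f]] = 1
--     return table
-- ===== Notes on version B (the rewrite author's own statement) =====
-- stated objective: alternative
-- what changed: B precomputes a set of final states and makes one pass over the unordered pairs of estados, marking a pair exactly when one member is final, instead of materialising nao_finais and iterating the finais x nao_finais cross product.
import Mathlib
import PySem

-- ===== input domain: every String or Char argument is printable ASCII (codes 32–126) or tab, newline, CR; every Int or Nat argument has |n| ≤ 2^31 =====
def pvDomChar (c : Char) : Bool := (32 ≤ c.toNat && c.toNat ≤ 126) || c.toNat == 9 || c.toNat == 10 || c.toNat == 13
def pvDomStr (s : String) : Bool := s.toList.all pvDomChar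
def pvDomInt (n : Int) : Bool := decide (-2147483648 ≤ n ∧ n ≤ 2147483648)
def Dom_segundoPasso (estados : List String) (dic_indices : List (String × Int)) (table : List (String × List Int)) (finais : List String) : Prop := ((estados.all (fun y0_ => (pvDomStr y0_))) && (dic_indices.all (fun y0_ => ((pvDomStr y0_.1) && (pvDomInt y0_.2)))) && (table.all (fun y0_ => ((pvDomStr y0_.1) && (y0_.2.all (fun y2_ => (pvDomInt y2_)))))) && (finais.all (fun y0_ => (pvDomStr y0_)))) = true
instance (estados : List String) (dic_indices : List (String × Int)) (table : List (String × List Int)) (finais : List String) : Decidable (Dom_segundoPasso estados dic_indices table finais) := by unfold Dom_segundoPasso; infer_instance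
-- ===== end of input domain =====

-- B replaces A's finais × nao_finais cross-product loop by a single pass over the unordered
-- pairs of estados with a precomputed final-state set (an alternative decomposition; B always
-- inspects all state pairs, so it can do more work than A when few states are final).
-- Python A mutates `table` in place and returns it; the equivalence proved here is about
-- the returned table value.

-- Shared helper: the write block `table[r][c] = 1` on a dict of int lists (both Python
-- sources contain this identical statement).  Exact when r is a key of the dict and c a
-- Python-valid index; Python raises KeyError / IndexError otherwise (excluded by Pre_).
def setCell : List (String × List Int) → String → Int → List (String × List Int)
  | [], _, _ => []
  | (k, l) :: rest, r, c =>
    if k = r then (k, PySem.List.pySetD l c 1) :: rest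
    else (k, l) :: setCell rest r c

-- Shared helper: the identical if/else marking block of both sources
-- (`if dic_indices[f] > dic_indices[nf]: table[f][...] = 1 else: table[nf][...] = 1`).
-- List.lookup is Python dict lookup (first match); none = KeyError, excluded by Pre_.
def markPair (dic_indices : List (String × Int)) (f nf : String) (t : List (String × List Int)) : List (String × List Int) :=
  match dic_indices.lookup f, dic_indices.lookup nf with
  | some idxF, some idxNf => if idxF > idxNf then setCell t f idxNf else setCell t nf idxF
  | _, _ => t

-- ===== PORT A =====
-- inner `for f in finais: if f == e: isFinal = True; break` scan of A
def isFinalScan (finais : List String) (e : String) : Bool :=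
  match finais with
  | [] => false
  | f :: fs => if f = e then true else isFinalScan fs e

def segundoPasso (estados : List String) (dic_indices : List (String × Int)) (table : List (String × List Int)) (finais : List String) : List (String × List Int) :=
  let nao_finais := estados.foldl (fun acc e => if isFinalScan finais e = false then acc ++ [e] else acc) []
  finais.foldl (fun t f => nao_finais.foldl (fun t nf => markPair dic_indices f nf t) t) table

-- ===== PORT B =====
-- the `while rest:` loop of B: peel the head p, mark it against every later q of
-- differing finality
def pairLoop (dic_indices : List (String × Int)) (F : PySem.Set String) : List String → List (String × List Int) → List (String × List Int)
  | [], t => t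
  | p :: rest, t =>
    pairLoop dic_indices F rest
      (rest.foldl (fun t q =>
        if F.contains p != F.contains q then
          let fnf := if F.contains p then (p, q) else (q, p)
          markPair dic_indices fnf.1 fnf.2 t
        else t) t)

def segundoPasso_alt (estados : List String) (dic_indices : List (String × Int)) (table : List (String × List Int)) (finais : List String) : List (String × List Int) :=
  pairLoop dic_indices (PySem.Set.ofList finais) estados table

-- ===== PRECONDITION & SPEC =====
-- true iff `table[r][c] = 1` would succeed in Python (key present, index in range)
def rowOk (table : List (String × List Int)) (r : String) (c : Int) : Bool :=
  match table.lookup r with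
  | some row => decide (PySem.Raise.InRange row.length c)
  | none => false

-- true iff A's marking statement for the pair (f, nf) would succeed in Python
def pairOk (dic_indices : List (String × Int)) (table : List (String × List Int)) (f nf : String) : Bool :=
  match dic_indices.lookup f, dic_indices.lookup nf with
  | some idxF, some idxNf => if idxF > idxNf then rowOk table f idxNf else rowOk table nf idxF
  | _, _ => false

-- Pre_ excludes (a) inputs where A raises KeyError/IndexError (a marked pair whose state is
-- missing from dic_indices or table, or whose target index is out of range), and (b) inputs
-- violating the DFA invariant finais ⊆ estados while a non-final state exists — there A
-- marks table rows for 'final' states that are not states of the automaton at all.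
def Pre_segundoPasso (estados : List String) (dic_indices : List (String × Int)) (table : List (String × List Int)) (finais : List String) : Prop :=
  ((∃ e ∈ estados, e ∉ finais) → ∀ f ∈ finais, f ∈ estados) ∧
  (∀ f ∈ finais, ∀ nf ∈ estados, nf ∉ finais → pairOk dic_indices table f nf = true)
instance (estados : List String) (dic_indices : List (String × Int)) (table : List (String × List Int)) (finais : List String) : Decidable (Pre_segundoPasso estados dic_indices table finais) := by unfold Pre_segundoPasso; infer_instance

def pvWitness_segundoPasso : List String × (List (String × Int)) × (List (String × List Int)) × List String :=
  (["a", "b"], [("a", 0), ("b", 1)], [("a", [0]), ("b", [0, 0])], ["b"])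

def Spec_segundoPasso (estados : List String) (dic_indices : List (String × Int)) (table : List (String × List Int)) (finais : List String) (out : List (String × List Int)) : Prop := out = segundoPasso_alt estados dic_indices table finais
instance (estados : List String) (dic_indices : List (String × Int)) (table : List (String × List Int)) (finais : List String) (out : List (String × List Int)) : Decidable (Spec_segundoPasso estados dic_indices table finais out) := by unfold Spec_segundoPasso; infer_instance

-- ===== CLAIM (what is proved, stated in full; the proofs are below) =====
def Claim_equal_segundoPasso : Prop := ∀ (estados : List String) (dic_indices : List (String × Int)) (table : List (String × List Int)) (finais : List String), Dom_segundoPasso estados dic_indices table finais → Pre_segundoPasso estados dic_indices table finais → Spec_segundoPasso estados dic_indices table finais (segundoPasso estados dic_indices table finais)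

-- ===== LEMMAS AND PROOFS =====

-- `xs[a] = v; xs[b] = v` commutes (same value written)
lemma pySetD_eq_of_some (xs : List Int) (i : Int) (n : Nat) (v : Int)
    (h : PySem.List.pyIdx? xs.length i = some n) :
    PySem.List.pySetD xs i v = xs.set n v := by
  simp [PySem.List.pySetD, PySem.List.pySet?, h]

lemma pySetD_eq_of_none (xs : List Int) (i : Int) (v : Int)
    (h : PySem.List.pyIdx? xs.length i = none) :
    PySem.List.pySetD xs i v = xs := by
  simp [PySem.List.pySetD, PySem.List.pySet?, h]

lemma pySetD_swap (l : List Int) (a b v : Int) :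
    PySem.List.pySetD (PySem.List.pySetD l a v) b v
      = PySem.List.pySetD (PySem.List.pySetD l b v) a v := by
  cases ha : PySem.List.pyIdx? l.length a with
  | none =>
    cases hb : PySem.List.pyIdx? l.length b with
    | none =>
      rw [pySetD_eq_of_none l a v ha, pySetD_eq_of_none l b v hb,
        pySetD_eq_of_none l a v ha]
    | some nb =>
      rw [pySetD_eq_of_none l a v ha, pySetD_eq_of_some l b nb v hb,
        pySetD_eq_of_none (l.set nb v) a v (by simpa using ha)]
  | some na =>
    cases hb : PySem.List.pyIdx? l.length b with
    | none =>
      rw [pySetD_eq_of_none l b v hb, pySetD_eq_of_some l a na v ha,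
        pySetD_eq_of_none (l.set na v) b v (by simpa using hb)]
    | some nb =>
      rw [pySetD_eq_of_some l a na v ha, pySetD_eq_of_some l b nb v hb,
        pySetD_eq_of_some (l.set na v) b nb v (by simpa using hb),
        pySetD_eq_of_some (l.set nb v) a na v (by simpa using ha)]
      by_cases h : na = nb
      · subst h; simp
      · exact List.set_comm v v h

lemma pySetD_idem (l : List Int) (c v : Int) :
    PySem.List.pySetD (PySem.List.pySetD l c v) c v = PySem.List.pySetD l c v := by
  cases h : PySem.List.pyIdx? l.length c with
  | none => rw [pySetD_eq_of_none l c v h, pySetD_eq_of_none l c v h]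
  | some n =>
    rw [pySetD_eq_of_some l c n v h, pySetD_eq_of_some (l.set n v) c n v (by simpa using h)]
    simp

lemma setCell_comm (t : List (String × List Int)) (r1 : String) (c1 : Int) (r2 : String) (c2 : Int) :
    setCell (setCell t r1 c1) r2 c2 = setCell (setCell t r2 c2) r1 c1 := by
  induction t with
  | nil => rfl
  | cons hd rest ih =>
    obtain ⟨k, l⟩ := hd
    by_cases h1 : k = r1 <;> by_cases h2 : k = r2
    · subst h1; subst h2; simp [setCell, pySetD_swap]
    · subst h1; simp [setCell, h2]
    · subst h2; simp [setCell, h1]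
    · simp [setCell, h1, h2, ih]

lemma setCell_idem (t : List (String × List Int)) (r : String) (c : Int) :
    setCell (setCell t r c) r c = setCell t r c := by
  induction t with
  | nil => rfl
  | cons hd rest ih =>
    obtain ⟨k, l⟩ := hd
    by_cases h : k = r
    · subst h; simp [setCell, pySetD_idem]
    · simp [setCell, h, ih]

lemma markPair_comm (dic : List (String × Int)) (a b c d : String) (t : List (String × List Int)) :
    markPair dic a b (markPair dic c d t) = markPair dic c d (markPair dic a b t) := by
  cases h1 : dic.lookup a <;> cases h2 : dic.lookup b <;>
    cases h3 : dic.lookup c <;> cases h4 : dic.lookup d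
  all_goals simp only [markPair, h1, h2, h3, h4]
  all_goals split_ifs <;> first | rfl | apply setCell_comm

lemma markPair_idem (dic : List (String × Int)) (a b : String) (t : List (String × List Int)) :
    markPair dic a b (markPair dic a b t) = markPair dic a b t := by
  cases h1 : dic.lookup a <;> cases h2 : dic.lookup b
  all_goals simp only [markPair, h1, h2]
  all_goals split_ifs <;> first | rfl | apply setCell_idem

-- generic fold machinery: a commutative idempotent step only sees the SET of elements
lemma foldl_absorb {α β : Type} (f : β → α → β)
    (hc : ∀ t a b, f (f t a) b = f (f t b) a)
    (hi : ∀ t a, f (f t a) a = f t a)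
    {a : α} {M : List α} (ha : a ∈ M) (t : β) :
    M.foldl f (f t a) = M.foldl f t := by
  induction M generalizing t with
  | nil => cases ha
  | cons b M ih =>
    rcases List.mem_cons.mp ha with rfl | hm
    · simp only [List.foldl_cons, hi]
    · simp only [List.foldl_cons]; rw [hc]; exact ih hm _

lemma foldl_perm {α β : Type} (f : β → α → β)
    (hc : ∀ t a b, f (f t a) b = f (f t b) a)
    {L M : List α} (hp : L.Perm M) : ∀ t, L.foldl f t = M.foldl f t := by
  induction hp with
  | nil => intro _; rfl
  | cons x _ ih => intro t; simp only [List.foldl_cons]; exact ih _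
  | swap x y l => intro t; simp only [List.foldl_cons, hc]
  | trans _ _ ih1 ih2 => intro t; rw [ih1, ih2]

lemma foldl_dedup {α β : Type} [DecidableEq α] (f : β → α → β)
    (hc : ∀ t a b, f (f t a) b = f (f t b) a)
    (hi : ∀ t a, f (f t a) a = f t a)
    (L : List α) : ∀ t, L.foldl f t = L.dedup.foldl f t := by
  induction L with
  | nil => intro t; rfl
  | cons a L ih =>
    intro t
    by_cases h : a ∈ L
    · rw [List.dedup_cons_of_mem h, List.foldl_cons, ih, foldl_absorb f hc hi (by rwa [List.mem_dedup])]
    · rw [List.dedup_cons_of_notMem h, List.foldl_cons, List.foldl_cons, ih]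

lemma foldl_set_eq {α β : Type} [DecidableEq α] (f : β → α → β)
    (hc : ∀ t a b, f (f t a) b = f (f t b) a)
    (hi : ∀ t a, f (f t a) a = f t a)
    (L M : List α) (h : ∀ x, x ∈ L ↔ x ∈ M) (t : β) :
    L.foldl f t = M.foldl f t := by
  rw [foldl_dedup f hc hi, foldl_dedup f hc hi M]
  exact foldl_perm f hc
    ((List.perm_ext_iff_of_nodup (List.nodup_dedup L) (List.nodup_dedup M)).mpr
      (by intro x; rw [List.mem_dedup, List.mem_dedup]; exact h x)) t

lemma nested_foldl_eq_flatMap {α β : Type} (fs : List String) (g : String → List α)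
    (s : β → α → β) (init : β) :
    fs.foldl (fun t f => (g f).foldl s t) init = (fs.flatMap g).foldl s init := by
  induction fs generalizing init with
  | nil => rfl
  | cons f fs ih => simp only [List.foldl_cons, List.flatMap_cons, List.foldl_append, ih]

lemma isFinalScan_eq (fs : List String) (e : String) : isFinalScan fs e = decide (e ∈ fs) := by
  induction fs with
  | nil => simp [isFinalScan]
  | cons f fs ih =>
    by_cases h : f = e
    · simp [isFinalScan, h]
    · simp [isFinalScan, h, ih]
      exact fun he => absurd he.symm h

-- B-side proof view: the oriented pair the inner body marks, if any
def orientF (F : PySem.Set String) (p q : String) : Option (String × String) :=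
  if F.contains p != F.contains q then some (if F.contains p then (p, q) else (q, p)) else none

def pairsOf (F : PySem.Set String) : List String → List (String × String)
  | [] => []
  | p :: rest => rest.filterMap (orientF F p) ++ pairsOf F rest

lemma pairLoop_eq (dic : List (String × Int)) (F : PySem.Set String) :
    ∀ (es : List String) (t : List (String × List Int)),
      pairLoop dic F es t = (pairsOf F es).foldl (fun t pr => markPair dic pr.1 pr.2 t) t := by
  intro es
  induction es with
  | nil => intro t; rfl
  | cons p rest ih =>
    intro t
    rw [pairLoop, ih, pairsOf, List.foldl_append]
    congr 1
    rw [List.foldl_filterMap]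
    apply PySem.List.foldl_congr_mem
    intro t q _hq
    unfold orientF
    by_cases h : (p ∈ F) ↔ (q ∈ F)
    · simp [h]
    · simp [h]

lemma orientF_symm (F : PySem.Set String) (p q : String) : orientF F p q = orientF F q p := by
  unfold orientF
  cases hp : F.contains p <;> cases hq : F.contains q <;> simp_all

lemma mem_pairsOf (F : PySem.Set String) (es : List String) (pr : String × String) :
    pr ∈ pairsOf F es ↔ ∃ p ∈ es, ∃ q ∈ es, orientF F p q = some pr := by
  induction es with
  | nil => simp [pairsOf]
  | cons a rest ih =>
    rw [pairsOf, List.mem_append, List.mem_filterMap, ih]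
    constructor
    · rintro (⟨q, hq, hor⟩ | ⟨p, hp, q, hq, hor⟩)
      · exact ⟨a, List.mem_cons_self .., q, List.mem_cons_of_mem _ hq, hor⟩
      · exact ⟨p, List.mem_cons_of_mem _ hp, q, List.mem_cons_of_mem _ hq, hor⟩
    · rintro ⟨p, hp, q, hq, hor⟩
      rcases List.mem_cons.mp hp with rfl | hp'
      · rcases List.mem_cons.mp hq with rfl | hq'
        · exfalso; simp [orientF] at hor
        · exact Or.inl ⟨q, hq', hor⟩
      · rcases List.mem_cons.mp hq with rfl | hq'
        · exact Or.inl ⟨p, hp', by rw [orientF_symm]; exact hor⟩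
        · exact Or.inr ⟨p, hp', q, hq', hor⟩

lemma containsF (finais : List String) (p : String) :
    (PySem.Set.ofList finais).contains p = decide (p ∈ finais) := by
  simp [PySem.Set.contains, PySem.Set.mem_ofList]

lemma orientF_eq_some_iff (finais : List String) (p q f nf : String) :
    orientF (PySem.Set.ofList finais) p q = some (f, nf) ↔
      ((f = p ∧ nf = q) ∨ (f = q ∧ nf = p)) ∧ f ∈ finais ∧ nf ∉ finais := by
  unfold orientF
  rw [containsF, containsF]
  by_cases hp : p ∈ finais <;> by_cases hq : q ∈ finais
  · simp [hp, hq]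
    rintro (⟨rfl, rfl⟩ | ⟨rfl, rfl⟩) _ <;> assumption
  · simp [hp, hq, Prod.ext_iff]
    constructor
    · rintro ⟨rfl, rfl⟩; exact ⟨Or.inl ⟨rfl, rfl⟩, hp, hq⟩
    · rintro ⟨⟨rfl, rfl⟩ | ⟨rfl, rfl⟩, hf, hnf⟩
      · exact ⟨rfl, rfl⟩
      · exact absurd hf hq
  · simp [hp, hq, Prod.ext_iff]
    constructor
    · rintro ⟨rfl, rfl⟩; exact ⟨Or.inr ⟨rfl, rfl⟩, hq, hp⟩
    · rintro ⟨⟨rfl, rfl⟩ | ⟨rfl, rfl⟩, hf, hnf⟩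
      · exact absurd hf hp
      · exact ⟨rfl, rfl⟩
  · simp [hp, hq]
    rintro (⟨rfl, rfl⟩ | ⟨rfl, rfl⟩) hf <;> [exact absurd hf hp; exact absurd hf hq]

-- ===== VERDICT (by name: the statement is the Claim_ definition above) =====
theorem segundoPasso_spec : Claim_equal_segundoPasso := by
  intro estados dic table finais _hDom hPre
  obtain ⟨hSub, _⟩ := hPre
  unfold Spec_segundoPasso
  show segundoPasso estados dic table finais = segundoPasso_alt estados dic table finais
  unfold segundoPasso segundoPasso_alt
  rw [pairLoop_eq]
  have hnao : estados.foldl (fun acc e => if isFinalScan finais e = false then acc ++ [e] else acc) ([] : List String)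
      = estados.filter (fun e => !decide (e ∈ finais)) := by
    rw [PySem.List.foldl_append_ite_eq_filter]
    simp [isFinalScan_eq]
  rw [hnao]
  have hA : finais.foldl
        (fun t f => (estados.filter (fun e => !decide (e ∈ finais))).foldl (fun t nf => markPair dic f nf t) t) table
      = (finais.flatMap (fun f => (estados.filter (fun e => !decide (e ∈ finais))).map (fun nf => (f, nf)))).foldl
          (fun t pr => markPair dic pr.1 pr.2 t) table := by
    rw [← nested_foldl_eq_flatMap]
    apply PySem.List.foldl_congr_mem
    intro t f _hf
    rw [List.foldl_map]
  rw [hA]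
  apply foldl_set_eq _ (fun t a b => markPair_comm dic b.1 b.2 a.1 a.2 t)
    (fun t a => markPair_idem dic a.1 a.2 t)
  rintro ⟨f, nf⟩
  rw [mem_pairsOf]
  constructor
  · intro h
    simp only [List.mem_flatMap, List.mem_map, List.mem_filter] at h
    obtain ⟨f', hf', nf', ⟨hnfe, hnff⟩, heq⟩ := h
    cases heq
    have hnff' : nf ∉ finais := by simpa using hnff
    have hfe : f ∈ estados := hSub ⟨nf, hnfe, hnff'⟩ f hf'
    exact ⟨f, hfe, nf, hnfe, (orientF_eq_some_iff finais f nf f nf).mpr ⟨Or.inl ⟨rfl, rfl⟩, hf', hnff'⟩⟩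
  · rintro ⟨p, hp, q, hq, hor⟩
    rw [orientF_eq_some_iff] at hor
    obtain ⟨hpq, hffin, hnffin⟩ := hor
    simp only [List.mem_flatMap, List.mem_map, List.mem_filter]
    rcases hpq with ⟨rfl, rfl⟩ | ⟨rfl, rfl⟩
    · exact ⟨f, hffin, nf, ⟨hq, by simpa using hnffin⟩, rfl⟩
    · exact ⟨f, hffin, nf, ⟨hp, by simpa using hnffin⟩, rfl⟩
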